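-- pv_equiv track=rewrite | github.com/blankettripod/Pastrel | src/Utility.py | LineFromCode
-- ===== SOURCE A (Python) =====
-- def LineFromCode(code: str = "", line: int = 0):
--     ln = 0
--     output = ""
--     for character in code:
--         if character == '\n':
--             ln += 1
--             continue
--
--         if ln == line:
--             output += character
--
--     return output
-- ===== SOURCE B (Python) =====
-- def LineFromCode(code: str = "", line: int = 0):
--     lines = code.split('\n')
--     return lines[line] if 0 <= line < len(lines) else ""
-- ===== Notes on version B (the rewrite author's own statement) =====
-- stated objective: idiomatic
-- what changed: Replaces the character-by-character scan that counts newlines and accumulates matching characters with a split-then-index strategy: split the string into lines once, then return the requested line by index with a bounds guard.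
import Mathlib
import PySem

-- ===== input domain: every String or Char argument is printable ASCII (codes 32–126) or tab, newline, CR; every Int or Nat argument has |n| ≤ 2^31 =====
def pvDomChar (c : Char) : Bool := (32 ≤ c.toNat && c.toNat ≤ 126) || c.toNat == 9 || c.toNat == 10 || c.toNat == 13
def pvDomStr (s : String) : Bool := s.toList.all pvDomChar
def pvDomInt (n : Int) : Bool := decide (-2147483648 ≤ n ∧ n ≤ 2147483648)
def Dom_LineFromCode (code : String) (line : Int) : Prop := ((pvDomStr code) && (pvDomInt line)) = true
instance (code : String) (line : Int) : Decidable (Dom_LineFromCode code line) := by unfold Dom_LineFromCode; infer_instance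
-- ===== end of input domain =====

-- B replaces A's newline-counting character scan with split-once-then-index (idiomatic; same asymptotics).

-- ===== PORT A =====
-- state (ln, output); '\n' bumps ln and skips the rest of the body ('continue'), otherwise
-- the character is appended when ln == line.
def LineFromCode (code : String) (line : Int) : String :=
  (code.toList.foldl
    (fun (s : Int × String) character =>
      if character = '\n' then (s.1 + 1, s.2)
      else if s.1 = line then (s.1, s.2.push character) else s)
    (0, "")).2

-- ===== PORT B =====
-- port of code.split('\n') (single-char separator): returns (first line, remaining lines)
def splitNl : List Char → List Char × List (List Char)
  | [] => ([], [])
  | c :: cs =>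
    let r := splitNl cs
    if c = '\n' then ([], r.1 :: r.2) else (c :: r.1, r.2)

def LineFromCode_alt (code : String) (line : Int) : String :=
  let p := splitNl code.toList
  let lines := p.1 :: p.2
  if 0 ≤ line ∧ line < (lines.length : Int) then String.ofList (lines.getD line.toNat []) else ""

-- ===== PRECONDITION & SPEC =====
def Spec_LineFromCode (code : String) (line : Int) (out : String) : Prop := out = LineFromCode_alt code line
instance (code : String) (line : Int) (out : String) : Decidable (Spec_LineFromCode code line out) := by unfold Spec_LineFromCode; infer_instance

-- ===== CLAIM (what is proved, stated in full; the proofs are below) =====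
def Claim_equal_LineFromCode : Prop := ∀ (code : String) (line : Int), Dom_LineFromCode code line → Spec_LineFromCode code line (LineFromCode code line)

-- ===== LEMMAS AND PROOFS =====

-- safe indexing: element at k, or [] when k is out of range
def getI (l : List (List Char)) (k : Int) : List Char :=
  if 0 ≤ k ∧ k < (l.length : Int) then l.getD k.toNat [] else []

theorem getI_zero (x : List Char) (t : List (List Char)) : getI (x :: t) 0 = x := by
  unfold getI
  rw [if_pos]
  · simp
  · refine ⟨le_refl 0, ?_⟩
    simp only [List.length_cons]
    exact_mod_cast Nat.succ_pos _

theorem getI_cons_nil (r : List (List Char)) (k : Int) :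
    getI ([] :: r) k = getI r (k - 1) := by
  unfold getI
  simp only [List.length_cons]
  split_ifs with h1 h2 h2
  · have hk : k.toNat = (k - 1).toNat + 1 := by omega
    rw [hk]
    simp
  · have hk : k = 0 := by omega
    subst hk
    simp
  · exfalso; omega
  · rfl

theorem getI_cons_ne (c : Char) (h : List Char) (t : List (List Char)) (k : Int) (hk : k ≠ 0) :
    getI ((c :: h) :: t) k = getI (h :: t) k := by
  unfold getI
  simp only [List.length_cons]
  split_ifs with h1
  · have hn : k.toNat = (k.toNat - 1) + 1 := by omega
    rw [hn]
    simp
  · rfl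

theorem foldA_eq (cs : List Char) (line : Int) : ∀ (ln : Int) (out : String),
    (cs.foldl
      (fun (s : Int × String) character =>
        if character = '\n' then (s.1 + 1, s.2)
        else if s.1 = line then (s.1, s.2.push character) else s)
      (ln, out)).2.toList
    = out.toList ++ getI ((splitNl cs).1 :: (splitNl cs).2) (line - ln) := by
  induction cs with
  | nil =>
    intro ln out
    simp only [List.foldl_nil, splitNl]
    unfold getI
    by_cases h : line - ln = 0
    · simp [h]
    · split_ifs with h1
      · exfalso
        simp only [List.length_cons, List.length_nil] at h1
        omega
      · simp
  | cons c cs ih =>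
    intro ln out
    by_cases hc : c = '\n'
    · subst hc
      simp only [List.foldl_cons, splitNl, reduceIte]
      rw [ih (ln + 1) out]
      have h1 : line - (ln + 1) = (line - ln) - 1 := by ring
      rw [h1, ← getI_cons_nil]
    · by_cases hl : ln = line
      · subst hl
        simp only [List.foldl_cons, splitNl, if_neg hc, reduceIte]
        rw [ih ln (out.push c)]
        have h0 : ln - ln = (0 : Int) := by ring
        rw [h0, getI_zero, getI_zero]
        simp
      · simp only [List.foldl_cons, splitNl, if_neg hc, if_neg hl]
        rw [ih ln out]
        rw [getI_cons_ne _ _ _ _ (by omega)]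

-- ===== VERDICT (by name: the statement is the Claim_ definition above) =====
theorem LineFromCode_spec : Claim_equal_LineFromCode := by
  intro code line _
  unfold Spec_LineFromCode LineFromCode LineFromCode_alt
  have h := foldA_eq code.toList line 0 ""
  simp only [sub_zero] at h
  apply String.toList_injective
  rw [h]
  simp only [String.toList_empty, List.nil_append]
  unfold getI
  split_ifs with hg
  · simp
  · simp
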